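-- pv_equiv track=rewrite | github.com/kestreltechnology/kt-semantic-code-search | scs/x86x/similarity/PropertyFormatter.py | format_detectors
-- ===== SOURCE A (Python) =====
-- def format_detectors(doccount,fsspecs,fsproperties):
--     lines = []
--     for spec in fsspecs:
--         if spec == 'group':
--             lowcutoff = int(0.1 * float(doccount))
--             highcutoff = int(0.9  * float(doccount))
--             high = []
--             low = []
--             medium = []
--             for t in fsproperties:
--                 count = fsproperties[t]
--                 if count >= highcutoff:
--                     high.append((count,t))
--                 elif count <= lowcutoff:
--                     low.append((count,t))
--                 else:
--                     medium.append((count,t))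
--             lines.append('High rate:')
--             for (c,t) in sorted(high): lines.append(str(c).rjust(5) + '  ' + t)
--             lines.append('\nLow rate:')
--             for (c,t) in sorted(low): lines.append(str(c).rjust(5) + '  ' + t)
--             lines.append('\nMedium rate:')
--             for (c,t) in sorted(medium): lines.append(str(c).rjust(5) + '  ' + t)
--         elif spec == 'default':
--             for t in sorted(fsproperties,key=lambda x:fsproperties[x]):
--                 lines.append(str(fsproperties[t]).rjust(6) + '  ' +  t)
--     return lines
-- ===== SOURCE B (Python) =====
-- def format_detectors(doccount, fsspecs, fsproperties):
--     lines = []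
--     for spec in fsspecs:
--         if spec == 'group':
--             lowcutoff = int(0.1 * float(doccount))
--             highcutoff = int(0.9 * float(doccount))
--             # sort all (count, name) pairs once; one pass then distributes them,
--             # already formatted, into the three buckets (each comes out sorted).
--             high, low, medium = [], [], []
--             for c, t in sorted((c, t) for t, c in fsproperties.items()):
--                 line = str(c).rjust(5) + '  ' + t
--                 if c >= highcutoff:
--                     high.append(line)
--                 elif c <= lowcutoff:
--                     low.append(line)
--                 else:
--                     medium.append(line)
--             lines += ['High rate:'] + high
--             lines += ['\nLow rate:'] + low
--             lines += ['\nMedium rate:'] + medium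
--         elif spec == 'default':
--             lines += [str(c).rjust(6) + '  ' + t
--                       for t, c in sorted(fsproperties.items(), key=lambda p: p[1])]
--     return lines
-- ===== Notes on version B (the rewrite author's own statement) =====
-- stated objective: alternative
-- what changed: The 'group' branch sorts the (count, name) pairs once with the default tuple ordering and then distributes them, already formatted, into the three rate buckets in a single pass (stability makes each bucket come out sorted), instead of A's partition-into-three-lists followed by three separate sorts and three append loops; the 'default' branch becomes a single sorted+comprehension pass.
import Mathlib
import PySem

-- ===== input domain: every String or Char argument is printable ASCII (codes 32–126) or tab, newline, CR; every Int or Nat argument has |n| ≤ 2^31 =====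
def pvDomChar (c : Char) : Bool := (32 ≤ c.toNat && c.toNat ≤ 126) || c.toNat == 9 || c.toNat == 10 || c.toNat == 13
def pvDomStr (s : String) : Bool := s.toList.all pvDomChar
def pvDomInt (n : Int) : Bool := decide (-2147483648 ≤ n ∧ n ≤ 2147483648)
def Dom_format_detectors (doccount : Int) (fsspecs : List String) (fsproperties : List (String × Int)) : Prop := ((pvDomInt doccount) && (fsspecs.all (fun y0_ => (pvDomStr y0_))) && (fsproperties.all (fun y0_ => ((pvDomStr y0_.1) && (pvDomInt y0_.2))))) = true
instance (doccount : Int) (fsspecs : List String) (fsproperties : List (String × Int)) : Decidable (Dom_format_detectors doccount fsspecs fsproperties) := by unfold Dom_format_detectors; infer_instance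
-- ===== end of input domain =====

-- ===== PORT A =====
-- B changes the decomposition of the 'group' branch: one global sort of the (count, name)
-- pairs followed by a single distributing pass, instead of partition-then-three-sorts (objective: alternative).

-- str(c).rjust(w) + '  ' + t, built over List Char (Lean's own String.append is kernel-opaque)
def pvFmtLine (w : Nat) (c : Int) (t : String) : String :=
  let ds := PySem.Int.toChars c
  String.ofList (List.replicate (w - ds.length) ' ' ++ ds ++ ' ' :: ' ' :: t.toList)

-- int(m/2^sh * float(n)) for |n| <= 2^31: exact IEEE-double emulation of int(0.1*float(n)) /
-- int(0.9*float(n)). float(n) is exact there; the exact product m*|n|*2^-sh is rounded to 53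
-- significant bits (ties to even), then truncated toward zero.
def pvRound53 (p : Nat) : Nat :=
  let k := PySem.Int.bitLength (p : Int)
  if k <= 53 then p else
    let sh := k - 53
    let q := p >>> sh
    let r := p % 2 ^ sh
    let half := 2 ^ (sh - 1)
    let q' := if half < r then q + 1 else if r < half then q else if q % 2 = 1 then q + 1 else q
    q' <<< sh

def pvIntOfMulFloat (m sh : Nat) (n : Int) : Int :=
  let p := pvRound53 (m * n.natAbs)
  (if n < 0 then -1 else 1) * ((p >>> sh : Nat) : Int)

def format_detectors (doccount : Int) (fsspecs : List String) (fsproperties : List (String × Int)) : List String :=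
  fsspecs.foldl (fun lines spec =>
    if spec = "group" then
      let lowcutoff := pvIntOfMulFloat 3602879701896397 55 doccount   -- int(0.1 * float(doccount)), 0.1 = 3602879701896397/2^55
      let highcutoff := pvIntOfMulFloat 8106479329266893 53 doccount  -- int(0.9 * float(doccount)), 0.9 = 8106479329266893/2^53
      let hlm := fsproperties.foldl
        (fun (acc : List (Int × String) × List (Int × String) × List (Int × String)) tc =>
          if highcutoff ≤ tc.2 then (acc.1 ++ [(tc.2, tc.1)], acc.2.1, acc.2.2)
          else if tc.2 ≤ lowcutoff then (acc.1, acc.2.1 ++ [(tc.2, tc.1)], acc.2.2)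
          else (acc.1, acc.2.1, acc.2.2 ++ [(tc.2, tc.1)])) ([], [], [])
      let lines := lines ++ ["High rate:"]
      let lines := (PySem.List.sorted2 hlm.1 (·.1) (·.2)).foldl (fun ls ct => ls ++ [pvFmtLine 5 ct.1 ct.2]) lines
      let lines := lines ++ ["\nLow rate:"]
      let lines := (PySem.List.sorted2 hlm.2.1 (·.1) (·.2)).foldl (fun ls ct => ls ++ [pvFmtLine 5 ct.1 ct.2]) lines
      let lines := lines ++ ["\nMedium rate:"]
      (PySem.List.sorted2 hlm.2.2 (·.1) (·.2)).foldl (fun ls ct => ls ++ [pvFmtLine 5 ct.1 ct.2]) lines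
    else if spec = "default" then
      (PySem.List.sorted fsproperties (·.2)).foldl (fun ls tc => ls ++ [pvFmtLine 6 tc.2 tc.1]) lines
    else lines) []

-- ===== PORT B =====
def format_detectors_alt (doccount : Int) (fsspecs : List String) (fsproperties : List (String × Int)) : List String :=
  fsspecs.foldl (fun lines spec =>
    if spec = "group" then
      let lowcutoff := pvIntOfMulFloat 3602879701896397 55 doccount
      let highcutoff := pvIntOfMulFloat 8106479329266893 53 doccount
      let buckets := (PySem.List.sorted2 (fsproperties.map (fun tc => (tc.2, tc.1))) (·.1) (·.2)).foldl
        (fun (acc : List String × List String × List String) ct =>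
          if highcutoff ≤ ct.1 then (acc.1 ++ [pvFmtLine 5 ct.1 ct.2], acc.2.1, acc.2.2)
          else if ct.1 ≤ lowcutoff then (acc.1, acc.2.1 ++ [pvFmtLine 5 ct.1 ct.2], acc.2.2)
          else (acc.1, acc.2.1, acc.2.2 ++ [pvFmtLine 5 ct.1 ct.2])) ([], [], [])
      lines ++ ("High rate:" :: buckets.1) ++ ("\nLow rate:" :: buckets.2.1) ++ ("\nMedium rate:" :: buckets.2.2)
    else if spec = "default" then
      lines ++ (PySem.List.sorted fsproperties (·.2)).map (fun tc => pvFmtLine 6 tc.2 tc.1)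
    else lines) []

-- ===== PRECONDITION & SPEC =====
def Spec_format_detectors (doccount : Int) (fsspecs : List String) (fsproperties : List (String × Int)) (out : List String) : Prop := out = format_detectors_alt doccount fsspecs fsproperties
instance (doccount : Int) (fsspecs : List String) (fsproperties : List (String × Int)) (out : List String) : Decidable (Spec_format_detectors doccount fsspecs fsproperties out) := by unfold Spec_format_detectors; infer_instance

-- ===== CLAIM (what is proved, stated in full; the proofs are below) =====
def Claim_equal_format_detectors : Prop := ∀ (doccount : Int) (fsspecs : List String) (fsproperties : List (String × Int)), Dom_format_detectors doccount fsspecs fsproperties → Spec_format_detectors doccount fsspecs fsproperties (format_detectors doccount fsspecs fsproperties)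

-- ===== LEMMAS AND PROOFS =====
-- the tuple comparison sorted2 uses on (count, name) pairs
def pvBlt (a b : Int × String) : Bool :=
  decide (a.1 < b.1) || (!decide (b.1 < a.1) && decide (a.2 < b.2))

def pvSorted (l : List (Int × String)) : Prop := l.Pairwise (fun a b => pvBlt b a = false)

lemma pvBlt_iff (a b : Int × String) :
    pvBlt a b = true ↔ (a.1 < b.1 ∨ (¬ b.1 < a.1 ∧ a.2 < b.2)) := by
  simp [pvBlt]

lemma pvBlt_asymm {a b : Int × String} (h : pvBlt a b = true) : pvBlt b a = false := by
  rw [pvBlt_iff] at h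
  rw [Bool.eq_false_iff, Ne, pvBlt_iff]
  rintro (h' | ⟨h1', h2'⟩)
  · rcases h with h | ⟨h1, h2⟩
    · exact lt_asymm h h'
    · exact h1 h'
  · rcases h with h | ⟨h1, h2⟩
    · exact h1' h
    · exact lt_asymm h2 h2'

lemma pvBlt_trans {a b c : Int × String} (h1 : pvBlt a b = true) (h2 : pvBlt b c = true) :
    pvBlt a c = true := by
  rw [pvBlt_iff] at h1 h2 ⊢
  rcases h1 with h1 | ⟨h1a, h1b⟩ <;> rcases h2 with h2 | ⟨h2a, h2b⟩
  · exact Or.inl (lt_trans h1 h2)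
  · exact Or.inl (lt_of_lt_of_le h1 (not_lt.mp h2a))
  · exact Or.inl (lt_of_le_of_lt (not_lt.mp h1a) h2)
  · exact Or.inr ⟨fun hca => h2a (lt_of_lt_of_le hca (not_lt.mp h1a)), lt_trans h1b h2b⟩

lemma pvBlt_trans_neg {a b c : Int × String} (h1 : pvBlt a b = true) (h2 : pvBlt c b = false) :
    pvBlt a c = true := by
  rw [pvBlt_iff] at h1
  rw [Bool.eq_false_iff, Ne, pvBlt_iff] at h2
  have h2a : b.1 ≤ c.1 := not_lt.mp (fun hh => h2 (Or.inl hh))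
  have h2b : c.1 ≤ b.1 → b.2 ≤ c.2 :=
    fun hcb => not_lt.mp (fun hh => h2 (Or.inr ⟨not_lt.mpr hcb, hh⟩))
  rw [pvBlt_iff]
  rcases h1 with h1 | ⟨h1a, h1b⟩
  · exact Or.inl (lt_of_lt_of_le h1 h2a)
  · by_cases hbc : b.1 < c.1
    · exact Or.inl (lt_of_le_of_lt (not_lt.mp h1a) hbc)
    · exact Or.inr ⟨fun hca => h1a (lt_of_le_of_lt h2a hca),
        lt_of_lt_of_le h1b (h2b (not_lt.mp hbc))⟩

lemma pv_insertBy_all {x : Int × String} {l : List (Int × String)}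
    (h : ∀ z ∈ l, pvBlt x z = true) : PySem.List.insertBy pvBlt x l = x :: l := by
  cases l with
  | nil => rfl
  | cons y t => simp [PySem.List.insertBy, h y (by simp)]

lemma pv_insertBy_sorted {x : Int × String} {l : List (Int × String)} (h : pvSorted l) :
    pvSorted (PySem.List.insertBy pvBlt x l) := by
  induction l with
  | nil => simp [PySem.List.insertBy, pvSorted]
  | cons y t ih =>
    obtain ⟨hy, ht⟩ := List.pairwise_cons.mp h
    by_cases hxy : pvBlt x y = true
    · simp only [PySem.List.insertBy, hxy, if_true]
      refine List.pairwise_cons.mpr ⟨?_, h⟩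
      intro z hz
      rcases List.mem_cons.mp hz with rfl | hz
      · exact pvBlt_asymm hxy
      · rw [Bool.eq_false_iff, Ne]
        intro hzx
        have := pvBlt_trans hzx hxy
        rw [hy z hz] at this
        exact Bool.false_ne_true this
    · simp only [PySem.List.insertBy, hxy, Bool.false_eq_true, if_false]
      refine List.pairwise_cons.mpr ⟨?_, ih ht⟩
      intro z hz
      rcases (PySem.List.mem_insertBy pvBlt x z t).mp hz with rfl | hz
      · exact Bool.eq_false_iff.mpr hxy
      · exact hy z hz

lemma pv_filter_insertBy (p : Int × String → Bool) {x : Int × String} {l : List (Int × String)}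
    (h : pvSorted l) :
    (PySem.List.insertBy pvBlt x l).filter p =
      if p x then PySem.List.insertBy pvBlt x (l.filter p) else l.filter p := by
  induction l with
  | nil => by_cases hp : p x <;> simp [PySem.List.insertBy, hp]
  | cons y t ih =>
    obtain ⟨hy, ht⟩ := List.pairwise_cons.mp h
    by_cases hxy : pvBlt x y = true
    · simp only [PySem.List.insertBy, hxy, if_true]
      by_cases hp : p x
      · rw [List.filter_cons_of_pos hp, if_pos hp, pv_insertBy_all]
        intro z hz
        rcases List.mem_cons.mp (List.mem_of_mem_filter hz) with rfl | hz'
        · exact hxy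
        · exact pvBlt_trans_neg hxy (hy z hz')
      · rw [List.filter_cons_of_neg (by simpa using hp), if_neg hp]
    · simp only [PySem.List.insertBy, hxy, Bool.false_eq_true, if_false]
      by_cases hpy : p y
      · rw [List.filter_cons_of_pos hpy, List.filter_cons_of_pos hpy, ih ht]
        by_cases hp : p x
        · rw [if_pos hp, if_pos hp]
          simp only [PySem.List.insertBy, hxy, Bool.false_eq_true, if_false]
        · rw [if_neg hp, if_neg hp]
      · rw [List.filter_cons_of_neg (by simpa using hpy),
            List.filter_cons_of_neg (by simpa using hpy), ih ht]

lemma pv_filter_foldl (p : Int × String → Bool) (xs : List (Int × String))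
    (acc : List (Int × String)) (h : pvSorted acc) :
    (xs.foldl (fun acc x => PySem.List.insertBy pvBlt x acc) acc).filter p =
      (xs.filter p).foldl (fun acc x => PySem.List.insertBy pvBlt x acc) (acc.filter p) := by
  induction xs generalizing acc with
  | nil => rfl
  | cons x t ih =>
    simp only [List.foldl_cons, List.filter_cons]
    rw [ih _ (pv_insertBy_sorted h), pv_filter_insertBy p h]
    by_cases hp : p x = true <;> simp [hp]

lemma pv_sorted2_eq (xs : List (Int × String)) :
    PySem.List.sorted2 xs (·.1) (·.2) =
      xs.foldl (fun acc x => PySem.List.insertBy pvBlt x acc) [] := rfl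

lemma pv_filter_sorted2 (p : Int × String → Bool) (xs : List (Int × String)) :
    (PySem.List.sorted2 xs (·.1) (·.2)).filter p = PySem.List.sorted2 (xs.filter p) (·.1) (·.2) := by
  rw [pv_sorted2_eq, pv_sorted2_eq, pv_filter_foldl p xs [] (by constructor)]
  rfl

lemma pv_foldl3 {α β : Type} (hc lc : Int) (m : α → Int) (f : α → β) (l : List α)
    (a b c : List β) :
    l.foldl (fun acc x =>
      if hc ≤ m x then (acc.1 ++ [f x], acc.2.1, acc.2.2)
      else if m x ≤ lc then (acc.1, acc.2.1 ++ [f x], acc.2.2)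
      else (acc.1, acc.2.1, acc.2.2 ++ [f x])) (a, b, c)
    = (a ++ (l.filter (fun x => decide (hc ≤ m x))).map f,
       b ++ (l.filter (fun x => !decide (hc ≤ m x) && decide (m x ≤ lc))).map f,
       c ++ (l.filter (fun x => !decide (hc ≤ m x) && !decide (m x ≤ lc))).map f) := by
  induction l generalizing a b c with
  | nil => simp
  | cons x t ih =>
    simp only [List.foldl_cons, List.filter_cons]
    by_cases h1 : hc ≤ m x
    · simp [h1, ih]
    · by_cases h2 : m x ≤ lc <;> simp [h1, h2, ih]

lemma pv_map_fst_swap (l : List (String × Int)) (p : Int × String → Bool) :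
    (l.map (fun tc => (tc.2, tc.1))).filter p = (l.filter (fun tc => p (tc.2, tc.1))).map (fun tc => (tc.2, tc.1)) := by
  rw [List.filter_map]; rfl

-- ===== VERDICT (by name: the statement is the Claim_ definition above) =====
theorem format_detectors_spec : Claim_equal_format_detectors := by
  intro doccount fsspecs fsproperties _
  show format_detectors doccount fsspecs fsproperties = format_detectors_alt doccount fsspecs fsproperties
  unfold format_detectors format_detectors_alt
  apply List.foldl_ext
  intro lines spec _
  by_cases hg : spec = "group"
  · rw [if_pos hg, if_pos hg]
    simp only [pv_foldl3, PySem.List.foldl_append_singleton_eq_map, pv_filter_sorted2,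
      pv_map_fst_swap, List.nil_append, List.append_assoc, List.cons_append]
  · rw [if_neg hg, if_neg hg]
    by_cases hd : spec = "default"
    · rw [if_pos hd, if_pos hd]
      exact PySem.List.foldl_append_singleton_eq_map _ _ _
    · rw [if_neg hd, if_neg hd]
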